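-- pv_equiv track=rewrite | github.com/BOLTB0X/Python_Basic | 코딩 기초 트레이닝/1로 만들기.py | solution
-- ===== SOURCE A (Python) =====
-- def solution(num_list):
--     answer = 0
--     for n in num_list:
--         number = n
--         while number != 1:
--             if not number % 2:
--                 number = number // 2
--             else:
--                 number = (number-1) // 2
--             answer += 1
--
--     return answer
-- ===== SOURCE B (Python) =====
-- def solution(num_list):
--     return sum(n.bit_length() - 1 for n in num_list)
-- ===== Notes on version B (the rewrite author's own statement) =====
-- stated objective: simpler
-- what changed: Replaces the per-element halving while-loop by the closed form bit_length(n)-1 = floor(log2 n), summed in one expression.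
import Mathlib
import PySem

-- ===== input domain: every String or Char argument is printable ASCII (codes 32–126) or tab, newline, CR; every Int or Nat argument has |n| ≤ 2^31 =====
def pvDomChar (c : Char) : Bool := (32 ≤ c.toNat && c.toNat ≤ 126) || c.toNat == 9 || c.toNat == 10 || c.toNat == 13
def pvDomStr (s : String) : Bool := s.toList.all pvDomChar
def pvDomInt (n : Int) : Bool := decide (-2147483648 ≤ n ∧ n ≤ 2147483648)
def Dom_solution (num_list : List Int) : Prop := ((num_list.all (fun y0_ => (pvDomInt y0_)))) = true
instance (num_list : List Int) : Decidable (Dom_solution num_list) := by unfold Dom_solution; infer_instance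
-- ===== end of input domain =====

-- B replaces A's per-element halving loop by the closed form bit_length(n)-1 (simpler one-liner); equivalence proved for lists of positive ints.

-- ===== PORT A =====
-- A's while loop: fuel = number.toNat suffices since number strictly decreases while > 1;
-- for number < 1 the Python loop never terminates (those inputs are outside Pre_).
def solutionLoop (fuel : Nat) (number answer : Int) : Int :=
  match fuel with
  | 0 => answer
  | f + 1 =>
    if number ≠ 1 then
      if PySem.Int.mod number 2 = 0 then
        solutionLoop f (PySem.Int.floordiv number 2) (answer + 1)
      else
        solutionLoop f (PySem.Int.floordiv (number - 1) 2) (answer + 1)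
    else answer

def solution (num_list : List Int) : Int :=
  num_list.foldl (fun answer n => solutionLoop n.toNat n answer) 0

-- ===== PORT B =====
def solution_alt (num_list : List Int) : Int :=
  (num_list.map (fun n => (PySem.Int.bitLength n : Int) - 1)).sum

-- ===== PRECONDITION & SPEC =====
-- Pre_ excludes non-positive elements, on which Python A's while loop never terminates (it diverges).
def Pre_solution (num_list : List Int) : Prop := ∀ n ∈ num_list, 1 ≤ n
instance (num_list : List Int) : Decidable (Pre_solution num_list) := by unfold Pre_solution; infer_instance
def pvWitness_solution : List Int := [1, 2, 7, 1000000]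

def Spec_solution (num_list : List Int) (out : Int) : Prop := out = solution_alt num_list
instance (num_list : List Int) (out : Int) : Decidable (Spec_solution num_list out) := by unfold Spec_solution; infer_instance

-- ===== CLAIM (what is proved, stated in full; the proofs are below) =====
def Claim_equal_solution : Prop := ∀ (num_list : List Int), Dom_solution num_list → Pre_solution num_list → Spec_solution num_list (solution num_list)

-- ===== LEMMAS AND PROOFS =====

lemma bitLengthAux_zero (fuel : Nat) : PySem.Int.bitLengthAux fuel 0 = 0 := by
  cases fuel with
  | zero => rfl
  | succ f => rw [PySem.Int.bitLengthAux]; simp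

lemma bitLengthAux_eq (fuel n : Nat) (h1 : 1 ≤ n) (hf : n < fuel) :
    PySem.Int.bitLengthAux fuel n = Nat.log2 n + 1 := by
  induction fuel generalizing n with
  | zero => omega
  | succ f ih =>
    rw [PySem.Int.bitLengthAux]
    have hn0 : n ≠ 0 := by omega
    simp only [hn0, if_false]
    by_cases h2 : 2 ≤ n
    · rw [ih (n / 2) (by omega) (by omega)]
      conv_rhs => rw [Nat.log2_def]
      simp [h2]
    · have hn1 : n = 1 := by omega
      subst hn1
      simp [bitLengthAux_zero, Nat.log2_def]

lemma bitLength_pos_eq (n : Int) (h : 1 ≤ n) :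
    (PySem.Int.bitLength n : Int) - 1 = (Nat.log2 n.toNat : Int) := by
  rw [PySem.Int.bitLength, bitLengthAux_eq _ _ (by omega) (by omega)]
  have : n.natAbs = n.toNat := by omega
  rw [this]; push_cast; ring

lemma solutionLoop_eq (fuel : Nat) : ∀ (n answer : Int), 1 ≤ n → n.toNat ≤ fuel →
    solutionLoop fuel n answer = answer + (Nat.log2 n.toNat : Int) := by
  induction fuel with
  | zero => intro n answer h1 h2; omega
  | succ f ih =>
    intro n answer h1 h2
    by_cases hn1 : n = 1
    · subst hn1
      simp [solutionLoop, Nat.log2_def]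
    · have h2n : 2 ≤ n := by omega
      have hhalf : PySem.Int.floordiv n 2 = n / 2 :=
        PySem.Int.floordiv_eq_ediv_of_pos (by omega)
      have hhalf' : PySem.Int.floordiv (n - 1) 2 = (n - 1) / 2 :=
        PySem.Int.floordiv_eq_ediv_of_pos (by omega)
      have hrec : ∀ m : Int, m = n / 2 →
          solutionLoop f m (answer + 1) = answer + 1 + (Nat.log2 m.toNat : Int) := by
        intro m hm
        apply ih m (answer + 1) (by omega) (by omega)
      have hmod : PySem.Int.mod n 2 = n % 2 := PySem.Int.mod_eq_emod_of_pos (by omega)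
      have hlog : (Nat.log2 n.toNat : Int) = (Nat.log2 (n.toNat / 2) : Int) + 1 := by
        rw [Nat.log2_def]
        have h2' : 2 ≤ n.toNat := by omega
        simp [h2']
      have htoNat : (n / 2).toNat = n.toNat / 2 := by
        rcases Int.toNat_of_nonneg (show (0:Int) ≤ n by omega) with h
        omega
      rw [solutionLoop]
      simp only [hn1, if_true, ne_eq, not_false_iff, if_true]
      by_cases he : PySem.Int.mod n 2 = 0
      · rw [if_pos he, hhalf, hrec _ rfl, htoNat, hlog]; ring
      · rw [if_neg he, hhalf']
        have hodd : n % 2 = 1 := by rw [hmod] at he; omega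
        have : (n - 1) / 2 = n / 2 := by omega
        rw [this, hrec _ rfl, htoNat, hlog]; ring

lemma fold_eq (xs : List Int) : ∀ (acc : Int), (∀ n ∈ xs, 1 ≤ n) →
    xs.foldl (fun answer n => solutionLoop n.toNat n answer) acc
      = acc + (xs.map (fun n => (PySem.Int.bitLength n : Int) - 1)).sum := by
  induction xs with
  | nil => intro acc _; simp
  | cons y ys ihy =>
    intro acc hpos
    have hy : 1 ≤ y := hpos y (List.mem_cons_self ..)
    simp only [List.foldl_cons, List.map_cons, List.sum_cons]
    rw [ihy _ (fun n hn => hpos n (List.mem_cons_of_mem _ hn)),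
        solutionLoop_eq _ _ _ hy (le_refl _), bitLength_pos_eq y hy]
    ring

-- ===== VERDICT (by name: the statement is the Claim_ definition above) =====
theorem solution_spec : Claim_equal_solution := by
  intro num_list _ hpre
  unfold Spec_solution solution solution_alt
  rw [fold_eq _ _ hpre]
  ring
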